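-- pv_equiv track=rewrite | github.com/Solo2218/belhard_5_tasks | tasks/medium/not_3.py | not_3
-- ===== SOURCE A (Python) =====
-- def not_3(array: list) -> list:
--     index = 0
--     while index < len(array):
--         match array[index] % 3:
--             case 0:
--                 del array[index]
--             case _:
--                 index += 1
--     return array
-- ===== SOURCE B (Python) =====
-- def not_3(array: list) -> list:
--     write = 0
--     for i in range(len(array)):
--         if array[i] % 3 != 0:
--             array[write] = array[i]
--             write += 1
--     del array[write:]
--     return array
-- ===== Notes on version B (the rewrite author's own statement) =====
-- stated objective: faster
-- what changed: Replaced the while-loop that deletes each multiple of 3 with del (shifting the tail every time) by a single-pass two-pointer compaction that overwrites kept elements at a write index and truncates the tail once.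
import Mathlib
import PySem

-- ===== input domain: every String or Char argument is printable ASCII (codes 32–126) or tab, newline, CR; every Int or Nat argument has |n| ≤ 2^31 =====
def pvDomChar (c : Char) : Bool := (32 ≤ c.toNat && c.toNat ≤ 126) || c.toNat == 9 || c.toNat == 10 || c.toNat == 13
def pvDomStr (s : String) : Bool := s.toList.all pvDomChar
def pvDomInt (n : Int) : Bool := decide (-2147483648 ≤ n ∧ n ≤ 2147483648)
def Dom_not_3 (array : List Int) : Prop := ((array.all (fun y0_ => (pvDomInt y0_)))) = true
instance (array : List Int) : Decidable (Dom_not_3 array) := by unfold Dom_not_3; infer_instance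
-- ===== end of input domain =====

-- B changes the algorithm (single overwrite-and-truncate pass instead of repeated in-place
-- deletion); both Pythons mutate the argument in place and return the same object — the
-- equivalence proved here is about the returned value.

-- ===== PORT A =====
-- while index < len(array): if array[index] % 3 == 0 then del array[index] else index += 1
def not3Loop (array : List Int) (index : Nat) : List Int :=
  if h : index < array.length then
    if PySem.Int.mod array[index] 3 = 0 then
      not3Loop (array.eraseIdx index) index
    else
      not3Loop array (index + 1)
  else array
termination_by array.length - index
decreasing_by
  · simp [List.length_eraseIdx, h]; omega
  · omega

def not_3 (array : List Int) : List Int := not3Loop array 0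

-- ===== PORT B =====
-- for i in range(len(array)): if array[i] % 3 != 0: array[write] = array[i]; write += 1
-- then del array[write:]  (returned value = arr.take write)
def not3Compact (n : Nat) (arr : List Int) (write i : Nat) : List Int × Nat :=
  if i < n then
    if PySem.Int.mod arr[i]! 3 ≠ 0 then
      not3Compact n (arr.set write arr[i]!) (write + 1) (i + 1)
    else
      not3Compact n arr write (i + 1)
  else (arr, write)
termination_by n - i

def not_3_alt (array : List Int) : List Int :=
  let r := not3Compact array.length array 0 0
  r.1.take r.2

-- ===== PRECONDITION & SPEC =====
def Spec_not_3 (array : List Int) (out : List Int) : Prop := out = not_3_alt array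
instance (array : List Int) (out : List Int) : Decidable (Spec_not_3 array out) := by unfold Spec_not_3; infer_instance

-- ===== CLAIM (what is proved, stated in full; the proofs are below) =====
def Claim_equal_not_3 : Prop := ∀ (array : List Int), Dom_not_3 array → Spec_not_3 array (not_3 array)

-- ===== LEMMAS AND PROOFS =====

-- A's loop returns the kept prefix plus the filtered suffix.
theorem not3Loop_eq (array : List Int) (index : Nat) :
    not3Loop array index =
      array.take index ++ (array.drop index).filter (fun x => PySem.Int.mod x 3 ≠ 0) := by
  induction array, index using not3Loop.induct with
  | case1 array index h hz ih =>
    have hd : (3 : Int) ∣ array[index] := (PySem.Int.mod_eq_zero_iff_dvd _ _).mp hz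
    rw [not3Loop, dif_pos h, if_pos hz, ih]
    have hlen : (array.take index).length = index := by
      simp [List.length_take, Nat.min_eq_left (Nat.le_of_lt h)]
    have h1 : (array.eraseIdx index).take index = array.take index := by
      rw [List.eraseIdx_eq_take_drop_succ, List.take_append, hlen]
      simp [List.take_take]
    have h2 : (array.eraseIdx index).drop index = array.drop (index + 1) := by
      rw [List.eraseIdx_eq_take_drop_succ, List.drop_append, hlen]
      simp [List.drop_eq_nil_of_le (le_of_eq hlen)]
    have hdrop : array.drop index = array[index] :: array.drop (index + 1) :=
      (List.getElem_cons_drop h).symm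
    rw [h1, h2, hdrop, List.filter_cons]
    simp [hd]
  | case2 array index h hz ih =>
    have hd : ¬ (3 : Int) ∣ array[index] := fun hdvd =>
      hz ((PySem.Int.mod_eq_zero_iff_dvd _ _).mpr hdvd)
    rw [not3Loop, dif_pos h, if_neg hz, ih]
    have hdrop : array.drop index = array[index] :: array.drop (index + 1) :=
      (List.getElem_cons_drop h).symm
    have htake : array.take (index + 1) = array.take index ++ [array[index]] :=
      List.take_succ_eq_append_getElem h
    rw [hdrop, List.filter_cons, if_pos (decide_eq_true hz), htake, List.append_assoc,
      List.singleton_append]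
  | case3 array index h =>
    rw [not3Loop, dif_neg h]
    have hle : array.length ≤ index := by omega
    rw [List.drop_eq_nil_of_le hle, List.take_of_length_le hle]
    simp

-- B's compaction: the kept prefix of the final array is the prefix already written
-- plus the filtered remaining suffix.
theorem not3Compact_eq (n : Nat) (arr : List Int) (w i : Nat) :
    arr.length = n → w ≤ i →
    (not3Compact n arr w i).1.take (not3Compact n arr w i).2 =
      arr.take w ++ (arr.drop i).filter (fun x => PySem.Int.mod x 3 ≠ 0) := by
  induction arr, w, i using not3Compact.induct n with
  | case1 arr w i h hz ih =>
    intro hlen hwi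
    have hi : i < arr.length := by omega
    have hx : arr[i]! = arr[i] := getElem!_pos arr i hi
    have hw : w < arr.length := by omega
    have hd : ¬ (3 : Int) ∣ arr[i] := fun hdvd => by
      rw [hx] at hz; exact hz ((PySem.Int.mod_eq_zero_iff_dvd _ _).mpr hdvd)
    rw [not3Compact, if_pos h, if_pos hz]
    rw [ih (by simpa using hlen) (by omega)]
    have hdropset : (arr.set w arr[i]!).drop (i + 1) = arr.drop (i + 1) := by
      rw [List.drop_set, if_pos (by omega : w < i + 1)]
    have htakeset : (arr.set w arr[i]!).take (w + 1) = arr.take w ++ [arr[i]] := by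
      rw [List.set_eq_take_append_cons_drop, if_pos hw, List.take_append]
      have hlw : (arr.take w).length = w := by
        simp [List.length_take, Nat.min_eq_left (Nat.le_of_lt hw)]
      rw [hlw]
      simp [List.take_take, hx]
    have hdrop : arr.drop i = arr[i] :: arr.drop (i + 1) :=
      (List.getElem_cons_drop hi).symm
    rw [htakeset, hdropset, hdrop, List.filter_cons]
    simp [hd]
  | case2 arr w i h hz ih =>
    intro hlen hwi
    have hi : i < arr.length := by omega
    have hx : arr[i]! = arr[i] := getElem!_pos arr i hi
    have hd : (3 : Int) ∣ arr[i] := by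
      rw [hx] at hz; simp only [not_not] at hz
      exact (PySem.Int.mod_eq_zero_iff_dvd _ _).mp hz
    rw [not3Compact, if_pos h, if_neg hz]
    rw [ih hlen (by omega)]
    have hdrop : arr.drop i = arr[i] :: arr.drop (i + 1) :=
      (List.getElem_cons_drop hi).symm
    rw [hdrop, List.filter_cons]
    simp [hd]
  | case3 arr w i h =>
    intro hlen hwi
    rw [not3Compact, if_neg h]
    have hle : arr.length ≤ i := by omega
    simp [List.drop_eq_nil_of_le hle]

-- ===== VERDICT (by name: the statement is the Claim_ definition above) =====
theorem not_3_spec : Claim_equal_not_3 := by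
  intro array _
  unfold Spec_not_3 not_3 not_3_alt
  rw [not3Loop_eq, not3Compact_eq array.length array 0 0 rfl (Nat.le_refl 0)]
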